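-- pv_equiv track=rewrite | github.com/9b2n/coding-test | 프로그래머스/2단계/택배상자.py | solution
-- ===== SOURCE A (Python) =====
-- from collections import deque
--
-- def solution(order):
--     answer = 0
--
--     order = deque(order)
--     stack = [i for i in range(1, order[0])]
--     origin = deque([i for i in range(order[0], len(order)+1)])
--
--     while order:
--         o = order.popleft()
--         if stack and stack[-1] == o:
--             stack.pop()
--             answer += 1
--         elif origin and origin[0] == o:
--             origin.popleft()
--             answer += 1
--         else:
--             if origin and origin[0] < o:
--                 stack.append(origin.popleft())
--                 order.appendleft(o)
--             else:
--                 break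
--
--     return answer
-- ===== SOURCE B (Python) =====
-- def solution(order):
--     n = len(order)
--     stack = list(range(1, order[0]))
--     idx = order[0]
--     answer = 0
--     for o in order:
--         while (not stack or stack[-1] != o) and idx <= n:
--             stack.append(idx)
--             idx += 1
--         if stack and stack[-1] == o:
--             stack.pop()
--             answer += 1
--         else:
--             break
--     return answer
-- ===== Notes on version B (the rewrite author's own statement) =====
-- stated objective: simpler
-- what changed: B replaces A's deque re-queue simulation (pop the target, push at most one conveyor box per outer iteration and re-insert the target at the front of the order deque) with a single forward pass over order and an inner while-loop that pushes conveyor boxes from a plain integer counter until the target is on top; the order deque, the origin deque and the appendleft re-queue disappear.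
import Mathlib
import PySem

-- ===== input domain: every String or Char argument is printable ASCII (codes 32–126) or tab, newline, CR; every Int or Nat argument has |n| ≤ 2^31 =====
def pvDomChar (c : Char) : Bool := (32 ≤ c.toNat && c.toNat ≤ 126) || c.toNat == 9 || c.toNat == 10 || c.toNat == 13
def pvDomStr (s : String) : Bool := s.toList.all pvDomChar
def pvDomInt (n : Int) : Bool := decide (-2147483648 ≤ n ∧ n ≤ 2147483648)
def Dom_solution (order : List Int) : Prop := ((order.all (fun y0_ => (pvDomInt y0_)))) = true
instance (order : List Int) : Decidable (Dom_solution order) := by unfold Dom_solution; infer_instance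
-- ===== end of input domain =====

-- B replaces A's deque re-queue simulation by one forward pass over order with an inner push
-- loop driven by an integer counter starting at the first ordered box (objective: simpler).

-- ===== PORT A =====
-- A's while-loop over the order deque; the Python stack grows at the right end, here the
-- stack is kept top-first (append = cons, stack[-1] = head, pop = tail); origin's popleft = tail.
def solutionLoop (order stack origin : List Int) (ans : Int) : Int :=
  match order with
  | [] => ans
  | o :: rest =>
    if stack.head? = some o then
      solutionLoop rest stack.tail origin (ans + 1)
    else if origin.head? = some o then
      solutionLoop rest stack origin.tail (ans + 1)
    else
      match origin with
      | g :: gs => if g < o then solutionLoop (o :: rest) (g :: stack) gs ans else ans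
      | [] => ans
termination_by order.length + origin.length
decreasing_by
  all_goals simp [List.length_tail]
  all_goals omega

def solution (order : List Int) : Int :=
  match order with
  | [] => 0  -- Python A raises IndexError reading the first element here; excluded by Pre_solution
  | o0 :: _ =>
    solutionLoop order ((PySem.List.pyRange 1 o0 1).reverse)
      (PySem.List.pyRange o0 ((order.length : Int) + 1) 1) 0

-- ===== PORT B =====
-- the inner while-loop of B: push idx, idx+1, … while the stack top is not o and idx ≤ n
def pushUpTo (stack : List Int) (idx n o : Int) : List Int × Int :=
  if idx ≤ n ∧ ¬ stack.head? = some o then pushUpTo (idx :: stack) (idx + 1) n o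
  else (stack, idx)
termination_by (n + 1 - idx).toNat
decreasing_by omega

def solutionAltLoop (order stack : List Int) (idx n ans : Int) : Int :=
  match order with
  | [] => ans
  | o :: rest =>
    let p := pushUpTo stack idx n o
    if p.1.head? = some o then solutionAltLoop rest p.1.tail p.2 n (ans + 1)
    else ans

def solution_alt (order : List Int) : Int :=
  match order with
  | [] => 0  -- Python B raises IndexError reading the first element here; excluded by Pre_solution
  | o0 :: _ =>
    solutionAltLoop order ((PySem.List.pyRange 1 o0 1).reverse) o0 (order.length : Int) 0

-- ===== PRECONDITION & SPEC =====
-- Pre_ excludes only the empty list, on which Python A raises IndexError reading its first element.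
def Pre_solution (order : List Int) : Prop := order ≠ []
instance (order : List Int) : Decidable (Pre_solution order) := by unfold Pre_solution; infer_instance
def pvWitness_solution : List Int := ([1, 3, 2])

def Spec_solution (order : List Int) (out : Int) : Prop := out = solution_alt order
instance (order : List Int) (out : Int) : Decidable (Spec_solution order out) := by unfold Spec_solution; infer_instance

-- ===== CLAIM (what is proved, stated in full; the proofs are below) =====
def Claim_equal_solution : Prop := ∀ (order : List Int), Dom_solution order → Pre_solution order → Spec_solution order (solution order)

-- ===== LEMMAS AND PROOFS =====

-- one-step unfolding lemmas for A's loop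
theorem solutionLoop_nil (stack origin : List Int) (ans : Int) :
    solutionLoop [] stack origin ans = ans := by
  rw [solutionLoop.eq_def]

theorem solutionLoop_pop (o : Int) (rest stack origin : List Int) (ans : Int)
    (hs : stack.head? = some o) :
    solutionLoop (o :: rest) stack origin ans = solutionLoop rest stack.tail origin (ans + 1) := by
  rw [solutionLoop.eq_def]; simp [hs]

theorem solutionLoop_take (o : Int) (rest stack : List Int) (g : Int) (gs : List Int) (ans : Int)
    (hs : ¬ stack.head? = some o) (hg : g = o) :
    solutionLoop (o :: rest) stack (g :: gs) ans = solutionLoop rest stack gs (ans + 1) := by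
  rw [solutionLoop.eq_def]; simp [hs, hg]

theorem solutionLoop_push (o : Int) (rest stack : List Int) (g : Int) (gs : List Int) (ans : Int)
    (hs : ¬ stack.head? = some o) (hg : ¬ g = o) (hlt : g < o) :
    solutionLoop (o :: rest) stack (g :: gs) ans = solutionLoop (o :: rest) (g :: stack) gs ans := by
  rw [solutionLoop.eq_def]; simp [hs, hg, hlt]

theorem solutionLoop_stop (o : Int) (rest stack : List Int) (ans : Int)
    (hs : ¬ stack.head? = some o) :
    solutionLoop (o :: rest) stack [] ans = ans := by
  rw [solutionLoop.eq_def]; simp [hs]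

theorem solutionLoop_stop2 (o : Int) (rest stack : List Int) (g : Int) (gs : List Int) (ans : Int)
    (hs : ¬ stack.head? = some o) (hg : ¬ g = o) (hge : ¬ g < o) :
    solutionLoop (o :: rest) stack (g :: gs) ans = ans := by
  rw [solutionLoop.eq_def]; simp [hs, hg, hge]

-- one-step unfolding lemmas for B's loop
theorem altLoop_nil (stack : List Int) (idx n ans : Int) :
    solutionAltLoop [] stack idx n ans = ans := by
  rw [solutionAltLoop.eq_def]

theorem altLoop_pop (o : Int) (rest stack : List Int) (idx n ans : Int)
    (h : (pushUpTo stack idx n o).1.head? = some o) :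
    solutionAltLoop (o :: rest) stack idx n ans
      = solutionAltLoop rest (pushUpTo stack idx n o).1.tail (pushUpTo stack idx n o).2 n (ans + 1) := by
  rw [solutionAltLoop.eq_def]; simp [h]

theorem altLoop_break (o : Int) (rest stack : List Int) (idx n ans : Int)
    (h : ¬ (pushUpTo stack idx n o).1.head? = some o) :
    solutionAltLoop (o :: rest) stack idx n ans = ans := by
  rw [solutionAltLoop.eq_def]; simp [h]

theorem pushUpTo_stop (stack : List Int) (idx n o : Int)
    (h : ¬ (idx ≤ n ∧ ¬ stack.head? = some o)) : pushUpTo stack idx n o = (stack, idx) := by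
  rw [pushUpTo, if_neg h]

theorem pushUpTo_step (stack : List Int) (idx n o : Int)
    (h1 : idx ≤ n) (h2 : ¬ stack.head? = some o) :
    pushUpTo stack idx n o = pushUpTo (idx :: stack) (idx + 1) n o := by
  conv_lhs => rw [pushUpTo]
  rw [if_pos ⟨h1, h2⟩]

-- If the current top is not o and every box still pushable differs from o, the final top is not o.
theorem pushUpTo_head_ne (stack : List Int) (idx n o : Int)
    (hor : o < idx ∨ n < o) (hh : ¬ stack.head? = some o) :
    ¬ (pushUpTo stack idx n o).1.head? = some o := by
  by_cases hc : idx ≤ n ∧ ¬ stack.head? = some o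
  · rw [pushUpTo_step stack idx n o hc.1 hc.2]
    have hio : ¬ idx = o := by rcases hor with h | h <;> omega
    exact pushUpTo_head_ne (idx :: stack) (idx + 1) n o
      (by rcases hor with h | h
          · exact Or.inl (by omega)
          · exact Or.inr h)
      (by simpa using hio)
  · rw [pushUpTo_stop stack idx n o hc]; exact hh
termination_by (n + 1 - idx).toNat
decreasing_by omega

-- Running the push loop from idx towards a target o with idx ≤ o ≤ n pushes idx..o and stops.
theorem pushUpTo_run (o n : Int) (ho : o ≤ n) (idx : Int) (stack : List Int)
    (hle : idx ≤ o) (hh : ¬ stack.head? = some o) :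
    pushUpTo stack idx n o = (o :: ((PySem.List.pyRange idx o 1).reverse ++ stack), o + 1) := by
  rcases eq_or_lt_of_le hle with heq | hlt
  · subst heq
    rw [pushUpTo_step stack idx n idx (by omega) hh]
    rw [pushUpTo_stop (idx :: stack) (idx + 1) n idx (by simp)]
    simp [PySem.List.pyRange_one_eq_nil (le_refl idx)]
  · rw [pushUpTo_step stack idx n o (by omega) hh]
    rw [pushUpTo_run o n ho (idx + 1) (idx :: stack) (by omega) (by simp; omega)]
    rw [PySem.List.pyRange_one_cons hlt]
    simp
termination_by (o - idx).toNat
decreasing_by omega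

-- Main invariant: with origin = [idx, …, n] the two loops agree.
theorem loop_eq (order stack : List Int) (idx n ans : Int) :
    solutionLoop order stack (PySem.List.pyRange idx (n + 1) 1) ans
      = solutionAltLoop order stack idx n ans := by
  match order with
  | [] => rw [solutionLoop_nil, altLoop_nil]
  | o :: rest =>
    by_cases hs : stack.head? = some o
    · -- tops agree: both pop, B's inner loop does not run
      rw [solutionLoop_pop o rest stack _ ans hs]
      have hpush := pushUpTo_stop stack idx n o (fun hc => hc.2 hs)
      rw [altLoop_pop o rest stack idx n ans (by rw [hpush]; exact hs), hpush]
      exact loop_eq rest stack.tail idx n (ans + 1)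
    · by_cases hin : idx ≤ n
      · rw [PySem.List.pyRange_one_cons (show idx < n + 1 by omega)]
        rcases lt_trichotomy idx o with hlt | heq | hgt
        · -- idx < o : A pushes idx; B's inner loop takes one step
          rw [solutionLoop_push o rest stack idx _ ans hs (by omega) hlt]
          rw [loop_eq (o :: rest) (idx :: stack) (idx + 1) n ans]
          have hstep := pushUpTo_step stack idx n o hin hs
          by_cases hh : (pushUpTo (idx :: stack) (idx + 1) n o).1.head? = some o
          · rw [altLoop_pop o rest _ _ n ans hh,
                altLoop_pop o rest stack idx n ans (by rw [hstep]; exact hh), hstep]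
          · rw [altLoop_break o rest _ _ n ans hh,
                altLoop_break o rest stack idx n ans (by rw [hstep]; exact hh)]
        · -- idx = o : A consumes from origin; B pushes o and pops it
          subst heq
          rw [solutionLoop_take idx rest stack idx _ ans hs rfl]
          have hrun := pushUpTo_run idx n hin idx stack (le_refl idx) hs
          rw [altLoop_pop idx rest stack idx n ans (by rw [hrun]; simp), hrun]
          simp only [PySem.List.pyRange_one_eq_nil (le_refl idx), List.reverse_nil,
            List.nil_append, List.tail_cons]
          exact loop_eq rest stack (idx + 1) n (ans + 1)
        · -- o < idx : both break
          rw [solutionLoop_stop2 o rest stack idx _ ans hs (by omega) (by omega)]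
          rw [altLoop_break o rest stack idx n ans (pushUpTo_head_ne stack idx n o (Or.inl hgt) hs)]
      · -- origin exhausted : both break
        rw [PySem.List.pyRange_one_eq_nil (show n + 1 ≤ idx by omega)]
        rw [solutionLoop_stop o rest stack ans hs]
        rw [altLoop_break o rest stack idx n ans (by rw [pushUpTo_stop stack idx n o (fun hc => hin hc.1)]; exact hs)]
termination_by order.length + (n + 1 - idx).toNat
decreasing_by
  all_goals simp [List.length_cons]
  all_goals omega

-- ===== VERDICT (by name: the statement is the Claim_ definition above) =====
theorem solution_spec : Claim_equal_solution := by
  intro order _ hpre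
  unfold Spec_solution
  match order with
  | [] => exact absurd rfl hpre
  | h :: t =>
    exact loop_eq (h :: t) ((PySem.List.pyRange 1 h 1).reverse) h ((h :: t).length : Int) 0
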